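-- pv_equiv track=rewrite | github.com/Chunngai/split-file | split_file.py | _process_combined_file_name
-- ===== SOURCE A (Python) =====
-- def _process_combined_file_name(combined_file_name):
--     meta_chr_str = ".^$*+?{}[]\\|()"
--
--     i = 0
--     name_len = len(combined_file_name)
--     while i < name_len:
--         if combined_file_name[i] in meta_chr_str:
--             combined_file_name = f"{combined_file_name[:i]}\\{combined_file_name[i:]}"
--             i += 1
--             name_len += 1
--
--         i += 1
--
--     return combined_file_name
-- ===== SOURCE B (Python) =====
-- def _process_combined_file_name(combined_file_name):
--     meta = ".^$*+?{}[]\\|()"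
--     return "".join("\\" + c if c in meta else c for c in combined_file_name)
-- ===== Notes on version B (the rewrite author's own statement) =====
-- stated objective: idiomatic
-- what changed: Replaces the in-place while loop that re-slices and re-splices the growing string (with manual index/length bookkeeping) by a single generator pass over the original characters joined once, mapping each meta character to its two-character escape.
import Mathlib
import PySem

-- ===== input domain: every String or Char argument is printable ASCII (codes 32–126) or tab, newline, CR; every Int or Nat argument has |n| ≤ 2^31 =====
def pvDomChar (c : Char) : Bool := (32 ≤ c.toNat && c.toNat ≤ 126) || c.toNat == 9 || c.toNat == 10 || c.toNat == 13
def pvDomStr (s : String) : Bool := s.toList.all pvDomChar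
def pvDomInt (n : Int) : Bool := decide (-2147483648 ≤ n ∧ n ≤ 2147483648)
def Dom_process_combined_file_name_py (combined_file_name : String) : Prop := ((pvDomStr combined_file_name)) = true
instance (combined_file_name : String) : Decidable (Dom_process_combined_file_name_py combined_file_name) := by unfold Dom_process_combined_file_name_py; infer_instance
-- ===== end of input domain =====

-- B replaces A's splice-and-reindex while loop with one generator pass joined once (idiomatic).

-- ===== PORT A =====
-- the characters of ".^$*+?{}[]\\|()"; 'c in meta_chr_str' is membership in this list
def pvMetaChars : List Char :=
  ['.', '^', '$', '*', '+', '?', '{', '}', '[', ']', '\\', '|', '(', ')']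

-- A's while loop on the current string (as List Char) and index i; the variable
-- name_len always equals the current string's length, so the guard is i < s.length.
-- s[:i] / s[i:] with 0 ≤ i are exactly List.take i / List.drop i.
def pvLoopA (s : List Char) (i : Nat) : List Char :=
  if h : i < s.length then
    if s[i] ∈ pvMetaChars then
      pvLoopA (s.take i ++ '\\' :: s.drop i) (i + 2)
    else
      pvLoopA s (i + 1)
  else s
termination_by s.length - i
decreasing_by
  · simp; omega
  · omega

def process_combined_file_name_py (combined_file_name : String) : String :=
  String.ofList (pvLoopA combined_file_name.toList 0)

-- ===== PORT B =====
def pvEsc (c : Char) : List Char := if c ∈ pvMetaChars then ['\\', c] else [c]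

def process_combined_file_name_py_alt (combined_file_name : String) : String :=
  String.ofList (combined_file_name.toList.flatMap pvEsc)

-- ===== PRECONDITION & SPEC =====
def Spec_process_combined_file_name_py (combined_file_name : String) (out : String) : Prop := out = process_combined_file_name_py_alt combined_file_name
instance (combined_file_name : String) (out : String) : Decidable (Spec_process_combined_file_name_py combined_file_name out) := by unfold Spec_process_combined_file_name_py; infer_instance

-- ===== CLAIM (what is proved, stated in full; the proofs are below) =====
def Claim_equal_process_combined_file_name_py : Prop := ∀ (combined_file_name : String), Dom_process_combined_file_name_py combined_file_name → Spec_process_combined_file_name_py combined_file_name (process_combined_file_name_py combined_file_name)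

-- ===== LEMMAS AND PROOFS =====

-- Invariant: with the processed prefix u in place and index at |u|, A's loop
-- leaves u intact and escapes the remaining suffix v character by character.
theorem pvLoopA_invariant (v u : List Char) :
    pvLoopA (u ++ v) u.length = u ++ v.flatMap pvEsc := by
  induction v generalizing u with
  | nil => rw [pvLoopA]; simp
  | cons c v ih =>
    rw [pvLoopA]
    have hlt : u.length < (u ++ c :: v).length := by simp
    rw [dif_pos hlt]
    have hget : (u ++ c :: v)[u.length]'hlt = c := by
      simp [List.getElem_append_right]
    rw [hget]
    by_cases hc : c ∈ pvMetaChars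
    · rw [if_pos hc]
      have h1 : (u ++ c :: v).take u.length = u := by
        simp
      have h2 : (u ++ c :: v).drop u.length = c :: v := by
        simp
      rw [h1, h2]
      have := ih (u ++ ['\\', c])
      simpa [List.append_assoc, pvEsc, hc, Nat.add_comm] using this
    · rw [if_neg hc]
      have := ih (u ++ [c])
      simpa [List.append_assoc, pvEsc, hc] using this

-- ===== VERDICT (by name: the statement is the Claim_ definition above) =====
theorem process_combined_file_name_py_spec : Claim_equal_process_combined_file_name_py := by
  intro s _
  unfold Spec_process_combined_file_name_py process_combined_file_name_py
    process_combined_file_name_py_alt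
  have h := pvLoopA_invariant s.toList []
  simp at h
  rw [h]
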